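-- pv_equiv track=rewrite | github.com/tdrvn/bf-interpreter | bf_merge_doesnt_work.py | calculate_number_of_steps
-- ===== SOURCE A (Python) =====
-- def calculate_number_of_steps(start, delta):
--     # we compute the number of steps we need to start at start and reach 0 MOD256
--     if delta == 255:
--         return start
--     if delta == 1:
--         return 256 - start
--     start = (start + 256) & 255
--     delta = (delta + 256) & 255
--     mod = 256
--     while delta & 1 == 0 and start & 1 == 0 and mod > 0:
--         delta //= 2
--         start //= 2
--         mod //= 2
--     if delta % 2 == 0:
--         # impossible case
--         # we can never reach 0
--         return None
--
--     dif = (mod - start) & (mod - 1)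
--     # i want to find x st x * delta = dif (mod), where delta and mod are coprime
--     x = (dif * pow(delta, -1, mod)) & (mod - 1)
--     return x
-- ===== SOURCE B (Python) =====
-- def calculate_number_of_steps(start, delta):
--     if delta == 255:
--         return start
--     if delta == 1:
--         return 256 - start
--     s = start & 255
--     d = delta & 255
--     for x in range(256):
--         if (s + x * d) % 256 == 0:
--             return x
--     return None
-- ===== Notes on version B (the rewrite author's own statement) =====
-- stated objective: simpler
-- what changed: Replaces A's power-of-two reduction plus modular-inverse closed form (pow(delta,-1,mod)) with a direct scan over the 256 residues for the least x with (start + x*delta) % 256 == 0.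
-- intended difference: On inputs with start % 256 == 0 and delta % 256 == 0, A returns None although the value is already 0; B returns 0, the intended number of steps. — e.g. on calculate_number_of_steps(0, 0): A returns none, B returns some 0
import Mathlib
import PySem

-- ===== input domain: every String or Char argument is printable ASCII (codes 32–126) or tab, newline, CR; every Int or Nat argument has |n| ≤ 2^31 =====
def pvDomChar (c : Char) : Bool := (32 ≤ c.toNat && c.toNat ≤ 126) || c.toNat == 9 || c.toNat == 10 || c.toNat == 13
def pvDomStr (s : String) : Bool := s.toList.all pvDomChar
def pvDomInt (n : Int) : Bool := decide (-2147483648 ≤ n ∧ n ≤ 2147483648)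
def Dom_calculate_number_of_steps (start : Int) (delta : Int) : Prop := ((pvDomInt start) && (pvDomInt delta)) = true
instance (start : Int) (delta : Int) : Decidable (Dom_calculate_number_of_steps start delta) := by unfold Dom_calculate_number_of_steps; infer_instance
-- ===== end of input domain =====

-- B replaces A's power-of-two reduction + modular inverse with a direct 256-step scan
-- for the least solution (objective: simpler); on start ≡ 0 ≡ delta (mod 256) A returns
-- None where B returns the intended 0 (see D_ below).

-- ===== PORT A =====

-- models Python's built-in pow(a, -1, m): the least inverse of a modulo m; A only calls it
-- with a invertible mod m, so the .getD 0 default is never taken on reachable paths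
def pvModInv (a m : Int) : Int :=
  ((PySem.List.pyRange 0 m 1).find? (fun x => PySem.Int.mod (a * x) m == 1)).getD 0

-- the while-loop: 'delta & 1' / 'start & 1' are ported as mod 2 (equal in Python for every
-- int); the fuel 9 is exact: mod halves 256 → 0 in 9 steps and the guard requires mod > 0
def pvLoopA : Nat → Int → Int → Int → Int × Int × Int
  | 0, delta, start, mod => (delta, start, mod)
  | fuel + 1, delta, start, mod =>
    if PySem.Int.mod delta 2 = 0 ∧ PySem.Int.mod start 2 = 0 ∧ mod > 0 then
      pvLoopA fuel (PySem.Int.floordiv delta 2) (PySem.Int.floordiv start 2) (PySem.Int.floordiv mod 2)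
    else (delta, start, mod)

-- the body after the guards; 'x & 255' on a nonneg x is 'x mod 256', and after the loop
-- 'x & (mod - 1)' (mod a power of two) is 'x mod mod'
def pvAcore (start delta : Int) : Option Int :=
  let t := pvLoopA 9 delta start 256
  let delta := t.1
  let start := t.2.1
  let mod := t.2.2
  if PySem.Int.mod delta 2 = 0 then none
  else
    let dif := PySem.Int.mod (mod - start) mod
    some (PySem.Int.mod (dif * pvModInv delta mod) mod)

def calculate_number_of_steps (start : Int) (delta : Int) : Option Int :=
  if delta = 255 then some start
  else if delta = 1 then some (256 - start)
  else pvAcore (PySem.Int.mod (start + 256) 256) (PySem.Int.mod (delta + 256) 256)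

-- ===== PORT B =====
def calculate_number_of_steps_alt (start : Int) (delta : Int) : Option Int :=
  if delta = 255 then some start
  else if delta = 1 then some (256 - start)
  else
    let s := PySem.Int.mod start 256   -- start & 255
    let d := PySem.Int.mod delta 256   -- delta & 255
    (PySem.List.pyRange 0 256 1).find? (fun x => PySem.Int.mod (s + x * d) 256 == 0)

-- ===== PRECONDITION & SPEC =====
-- On inputs with start ≡ 0 and delta ≡ 0 (mod 256) A returns None although the cell already
-- holds 0; B returns 0 (zero steps needed), which is the intended answer.
def D_calculate_number_of_steps (start : Int) (delta : Int) : Prop :=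
  start % 256 = 0 ∧ delta % 256 = 0
instance (start : Int) (delta : Int) : Decidable (D_calculate_number_of_steps start delta) := by
  unfold D_calculate_number_of_steps; infer_instance

def Spec_calculate_number_of_steps (start : Int) (delta : Int) (out : Option Int) : Prop :=
  ¬ D_calculate_number_of_steps start delta → out = calculate_number_of_steps_alt start delta
instance (start : Int) (delta : Int) (out : Option Int) : Decidable (Spec_calculate_number_of_steps start delta out) := by
  unfold Spec_calculate_number_of_steps; infer_instance

def pvDiffWitness_calculate_number_of_steps : Int × Int := (0, 0)
def pvDiffWitnessOut_calculate_number_of_steps : (Option Int) × (Option Int) := (none, some 0)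

-- ===== CLAIM (what is proved, stated in full; the proofs are below) =====
def Claim_unchanged_calculate_number_of_steps : Prop := ∀ (start : Int) (delta : Int), Dom_calculate_number_of_steps start delta → Spec_calculate_number_of_steps start delta (calculate_number_of_steps start delta)
def Claim_changed_calculate_number_of_steps : Prop := Dom_calculate_number_of_steps (pvDiffWitness_calculate_number_of_steps.1) (pvDiffWitness_calculate_number_of_steps.2) ∧ D_calculate_number_of_steps (pvDiffWitness_calculate_number_of_steps.1) (pvDiffWitness_calculate_number_of_steps.2) ∧ calculate_number_of_steps (pvDiffWitness_calculate_number_of_steps.1) (pvDiffWitness_calculate_number_of_steps.2) = pvDiffWitnessOut_calculate_number_of_steps.1 ∧ calculate_number_of_steps_alt (pvDiffWitness_calculate_number_of_steps.1) (pvDiffWitness_calculate_number_of_steps.2) = pvDiffWitnessOut_calculate_number_of_steps.2 ∧ pvDiffWitnessOut_calculate_number_of_steps.1 ≠ pvDiffWitnessOut_calculate_number_of_steps.2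
def Claim_exact_calculate_number_of_steps : Prop := ∀ (start : Int) (delta : Int), Dom_calculate_number_of_steps start delta → D_calculate_number_of_steps start delta → calculate_number_of_steps start delta ≠ calculate_number_of_steps_alt start delta

-- ===== LEMMAS AND PROOFS =====

lemma pv_mod_shift (a : Int) : PySem.Int.mod (a + 256) 256 = PySem.Int.mod a 256 := by
  rw [PySem.Int.mod_eq_emod_of_pos (by omega), PySem.Int.mod_eq_emod_of_pos (by omega)]
  omega

lemma pv_mod_range (a : Int) : 0 ≤ PySem.Int.mod a 256 ∧ PySem.Int.mod a 256 < 256 := by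
  rw [PySem.Int.mod_eq_emod_of_pos (by omega)]
  omega

-- the loop is inert once mod = 0
lemma pvLoopA_mod_zero (fuel : Nat) (d s : Int) : pvLoopA fuel d s 0 = (d, s, 0) := by
  cases fuel <;> simp [pvLoopA]

-- loop characterization: starting from mod = 2^t with t < fuel, the loop halves k times,
-- 2^k divides both arguments, and it stops either with mod = 2^(t-k) > 0 because one of
-- the halved values is odd, or with mod = 0 after t+1 halvings
lemma pvLoopA_spec (fuel : Nat) : ∀ (t : Nat) (d s : Int), 0 ≤ d → 0 ≤ s → t < fuel →
    ∃ k : Nat, k ≤ t + 1 ∧ (2 ^ k : Int) ∣ d ∧ (2 ^ k : Int) ∣ s ∧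
      ((k ≤ t ∧ pvLoopA fuel d s (2 ^ t) = (d / 2 ^ k, s / 2 ^ k, 2 ^ (t - k)) ∧
          ¬((d / 2 ^ k) % 2 = 0 ∧ (s / 2 ^ k) % 2 = 0))
       ∨ (k = t + 1 ∧ pvLoopA fuel d s (2 ^ t) = (d / 2 ^ k, s / 2 ^ k, 0))) := by
  induction fuel with
  | zero => intro t d s _ _ h; omega
  | succ fuel ih =>
    intro t d s hd hs ht
    have hmod2 : ∀ a : Int, PySem.Int.mod a 2 = a % 2 := fun a =>
      PySem.Int.mod_eq_emod_of_pos (by omega)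
    have hfd2 : ∀ a : Int, PySem.Int.floordiv a 2 = a / 2 := fun a =>
      PySem.Int.floordiv_eq_ediv_of_pos (by omega)
    by_cases hc : d % 2 = 0 ∧ s % 2 = 0
    · -- the guard holds: one more halving
      have hcond : PySem.Int.mod d 2 = 0 ∧ PySem.Int.mod s 2 = 0 ∧ (2 ^ t : Int) > 0 :=
        ⟨by rw [hmod2]; exact hc.1, by rw [hmod2]; exact hc.2, by positivity⟩
      have hstep : pvLoopA (fuel + 1) d s (2 ^ t) =
          pvLoopA fuel (d / 2) (s / 2) ((2 ^ t : Int) / 2) := by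
        rw [pvLoopA, if_pos hcond, hfd2, hfd2, hfd2]
      have hdd : (2 : Int) ∣ d := Int.dvd_of_emod_eq_zero hc.1
      have hds : (2 : Int) ∣ s := Int.dvd_of_emod_eq_zero hc.2
      obtain ⟨d1, rfl⟩ := hdd
      obtain ⟨s1, rfl⟩ := hds
      have hd1 : 0 ≤ d1 := by omega
      have hs1 : 0 ≤ s1 := by omega
      have hdiv1 : (2 * d1) / 2 = d1 := by omega
      have hdiv2 : (2 * s1) / 2 = s1 := by omega
      cases t with
      | zero =>
        -- mod = 1 halves to 0; the next call is inert whatever the fuel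
        refine ⟨1, by omega, by simp, by simp,
          Or.inr ⟨rfl, ?_⟩⟩
        have : ((2 : Int) ^ 0) / 2 = 0 := by norm_num
        rw [hstep, this, pvLoopA_mod_zero, hdiv1, hdiv2]
        norm_num
      | succ t1 =>
        have hpow : ((2 : Int) ^ (t1 + 1)) / 2 = 2 ^ t1 := by
          rw [pow_succ]
          omega
        obtain ⟨k1, hk1le, ⟨u, hu⟩, ⟨v, hv⟩, hbr⟩ := ih t1 d1 s1 hd1 hs1 (by omega)
        have hud : (2 * d1) / 2 ^ (k1 + 1) = d1 / 2 ^ k1 := by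
          rw [hu]
          have e1 : 2 * (2 ^ k1 * u) = (2 ^ (k1 + 1) : Int) * u := by ring
          have e2 : (2 ^ k1 : Int) * u = 2 ^ k1 * u := rfl
          rw [e1, Int.mul_ediv_cancel_left _ (by positivity), Int.mul_ediv_cancel_left _ (by positivity)]
        have hus : (2 * s1) / 2 ^ (k1 + 1) = s1 / 2 ^ k1 := by
          rw [hv]
          have e1 : 2 * (2 ^ k1 * v) = (2 ^ (k1 + 1) : Int) * v := by ring
          rw [e1, Int.mul_ediv_cancel_left _ (by positivity), Int.mul_ediv_cancel_left _ (by positivity)]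
        refine ⟨k1 + 1, by omega, ⟨u, by rw [hu]; ring⟩, ⟨v, by rw [hv]; ring⟩, ?_⟩
        rcases hbr with ⟨hk1t, heq, hodd⟩ | ⟨hk1t, heq⟩
        · refine Or.inl ⟨by omega, ?_, ?_⟩
          · rw [hstep, hdiv1, hdiv2, hpow, heq, hud, hus]
            have : t1 + 1 - (k1 + 1) = t1 - k1 := by omega
            rw [this]
          · rw [hud, hus]; exact hodd
        · refine Or.inr ⟨by omega, ?_⟩
          rw [hstep, hdiv1, hdiv2, hpow, heq, hud, hus]
    · -- the guard fails at once: k = 0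
      refine ⟨0, by omega, one_dvd _, one_dvd _, Or.inl ⟨by omega, ?_, by simpa using hc⟩⟩
      have hcond : ¬(PySem.Int.mod d 2 = 0 ∧ PySem.Int.mod s 2 = 0 ∧ (2 ^ t : Int) > 0) := by
        rw [hmod2, hmod2]
        intro h
        exact hc ⟨h.1, h.2.1⟩
      rw [pvLoopA, if_neg hcond]
      simp

-- find? over range(a, b) returns the first witness
lemma pv_find?_pyRange_eq_some (p : Int → Bool) (b c : Int) : ∀ (a : Int), a ≤ c → c < b →
    p c = true → (∀ y, a ≤ y → y < c → p y = false) →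
    (PySem.List.pyRange a b 1).find? p = some c := by
  intro a hac hcb hc hlt
  induction hn : (c - a).toNat generalizing a with
  | zero =>
    have : a = c := by omega
    subst this
    rw [PySem.List.pyRange_one_cons (by omega)]
    simp [hc]
  | succ n ihn =>
    rw [PySem.List.pyRange_one_cons (by omega)]
    have hpa : p a = false := hlt a le_rfl (by omega)
    simp only [List.find?_cons, hpa]
    exact ihn (a + 1) (by omega) (fun y h1 h2 => hlt y (by omega) h2) (by omega)

lemma pv_find?_pyRange_eq_none (p : Int → Bool) (a b : Int)
    (h : ∀ y, a ≤ y → y < b → p y = false) :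
    (PySem.List.pyRange a b 1).find? p = none := by
  rw [List.find?_eq_none]
  intro x hx
  have := PySem.List.mem_pyRange_one.mp hx
  simp [h x this.1 this.2]

-- an odd integer is coprime to any power of two
lemma pv_coprime_pow_two (j : Nat) (a : Int) (ha : a % 2 = 1) : IsCoprime ((2 : Int) ^ j) a := by
  apply IsCoprime.pow_left
  rw [Int.isCoprime_iff_gcd_eq_one]
  have h1 : a.natAbs % 2 = 1 := by omega
  show Int.gcd 2 a = 1
  have h2 : Nat.gcd 2 a.natAbs = 1 := by
    rw [Nat.gcd_rec, h1, Nat.gcd_one_left]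
  simpa [Int.gcd] using h2

-- A's reduced value equals the first solution of start + x*delta ≡ 0 (mod 256)
lemma pv_key (s d : Int) (hs0 : 0 ≤ s) (hs1 : s < 256) (hd0 : 0 ≤ d) (hd1 : d < 256)
    (hne : ¬(s = 0 ∧ d = 0)) :
    pvAcore s d =
      (PySem.List.pyRange 0 256 1).find? (fun x => PySem.Int.mod (s + x * d) 256 == 0) := by
  obtain ⟨k, hkle, hdvd_d, hdvd_s, hbr⟩ := pvLoopA_spec 9 8 d s hd0 hs0 (by omega)
  rcases hbr with ⟨hk8, hloop, hexit⟩ | ⟨hk9, hloop⟩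
  swap
  · -- nine halvings mean 512 ∣ d and 512 ∣ s, hence d = s = 0, excluded
    subst hk9
    norm_num at hdvd_d hdvd_s
    exact absurd ⟨by omega, by omega⟩ hne
  have hpowpos : (0 : Int) < 2 ^ k := by positivity
  obtain ⟨Du, hDu⟩ := hdvd_d
  obtain ⟨Su, hSu⟩ := hdvd_s
  have heD : d / 2 ^ k = Du := by rw [hDu]; exact Int.mul_ediv_cancel_left _ (by positivity)
  have heS : s / 2 ^ k = Su := by rw [hSu]; exact Int.mul_ediv_cancel_left _ (by positivity)
  rw [heD, heS] at hloop hexit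
  have hDu0 : 0 ≤ Du := by nlinarith
  have hSu0 : 0 ≤ Su := by nlinarith
  have h256 : (256 : Int) = 2 ^ 8 := by norm_num
  have hloop' : pvLoopA 9 d s 256 = (Du, Su, 2 ^ (8 - k)) := by rw [h256]; exact hloop
  have hdecomp : ∀ x : Int, s + x * d = 2 ^ k * (Su + x * Du) := by
    intro x; rw [hDu, hSu]; ring
  have hsplit : (256 : Int) = 2 ^ k * 2 ^ (8 - k) := by
    rw [← pow_add, show k + (8 - k) = 8 from by omega]
    norm_num
  have hdvdP : ∀ x : Int, ((256 : Int) ∣ (s + x * d)) ↔ ((2 : Int) ^ (8 - k) ∣ (Su + x * Du)) := by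
    intro x
    rw [hdecomp, hsplit, mul_dvd_mul_iff_left (by positivity : (2 ^ k : Int) ≠ 0)]
  have hmod256 : ∀ a : Int, PySem.Int.mod a 256 = a % 256 := fun a =>
    PySem.Int.mod_eq_emod_of_pos (by omega)
  simp only [pvAcore, hloop']
  by_cases hDodd : Du % 2 = 0
  · -- delta reduced to an even number: A returns none and no x solves the congruence
    have hSodd : Su % 2 = 1 := by
      rcases hexit with h
      omega
    have hSu1 : 1 ≤ Su := by omega
    have hk7 : k ≤ 7 := by
      by_contra hk
      have hk8' : k = 8 := by omega
      subst hk8'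
      nlinarith
    rw [if_pos (by rw [PySem.Int.mod_eq_emod_of_pos (by omega)]; exact hDodd)]
    symm
    apply pv_find?_pyRange_eq_none
    intro y _ _
    simp only [hmod256, beq_eq_false_iff_ne, ne_eq]
    intro hy
    have h1 : (256 : Int) ∣ (s + y * d) := Int.dvd_of_emod_eq_zero hy
    have h2 : (2 : Int) ^ (8 - k) ∣ (Su + y * Du) := (hdvdP y).mp h1
    have h3 : (2 : Int) ∣ (Su + y * Du) :=
      dvd_trans (dvd_pow_self 2 (by omega : 8 - k ≠ 0)) h2
    have h4 : (2 : Int) ∣ y * Du := Dvd.dvd.mul_left (Int.dvd_of_emod_eq_zero hDodd) y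
    obtain ⟨a, ha⟩ := h3
    obtain ⟨b, hb⟩ := h4
    omega
  · -- delta reduced to an odd number: A returns the unique solution below 2^(8-k)
    have hDodd' : Du % 2 = 1 := by omega
    have hDu1 : 1 ≤ Du := by omega
    have hk7 : k ≤ 7 := by
      by_contra hk
      have hk8' : k = 8 := by omega
      subst hk8'
      nlinarith
    have hj1 : 1 ≤ 8 - k := by omega
    set M : Int := 2 ^ (8 - k) with hM
    have hMpos : (0 : Int) < M := by positivity
    have hM2 : (2 : Int) ≤ M := by
      calc (2 : Int) = 2 ^ 1 := by norm_num
      _ ≤ 2 ^ (8 - k) := pow_le_pow_right₀ (by norm_num) hj1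
    have hM256 : M ≤ 256 := by
      rw [h256]
      exact pow_le_pow_right₀ (by norm_num) (by omega)
    have hmodM : ∀ a : Int, PySem.Int.mod a M = a % M := fun a =>
      PySem.Int.mod_eq_emod_of_pos hMpos
    have hcop : IsCoprime M Du := pv_coprime_pow_two (8 - k) Du hDodd'
    -- the inverse scan succeeds: an inverse below M exists
    obtain ⟨u, v, huv⟩ := id hcop
    have hwit : ∃ x ∈ PySem.List.pyRange 0 M 1,
        (fun x => PySem.Int.mod (Du * x) M == 1) x = true := by
      refine ⟨v % M, PySem.List.mem_pyRange_one.mpr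
        ⟨Int.emod_nonneg v (by omega), Int.emod_lt_of_pos v hMpos⟩, ?_⟩
      simp only [hmodM, beq_iff_eq]
      have e1 : (Du * (v % M)) % M = (Du * v) % M := by
        rw [Int.mul_emod, Int.emod_emod_of_dvd v dvd_rfl, ← Int.mul_emod]
      have e2 : Du * v = 1 - M * u := by linarith [huv]
      rw [e1, e2, Int.sub_mul_emod_self_left]
      exact Int.emod_eq_of_lt (by omega) (by omega)
    cases hfo : (PySem.List.pyRange 0 M 1).find? (fun x => PySem.Int.mod (Du * x) M == 1) with
    | none =>
      exfalso
      obtain ⟨x, hx1, hx2⟩ := hwit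
      have := List.find?_eq_none.mp hfo x hx1
      simp [hx2] at this
    | some w0 =>
      have hw0 : (Du * w0) % M = 1 := by
        have := List.find?_some hfo
        simpa [hmodM, beq_iff_eq] using this
      have hInv : pvModInv Du M = w0 := by
        unfold pvModInv
        rw [hfo]
        rfl
      rw [if_neg (by rw [PySem.Int.mod_eq_emod_of_pos (by omega : (0:Int) < 2)]; omega)]
      simp only [hInv, hmodM]
      set x0 : Int := ((M - Su) % M * w0) % M with hx0
      have hx0nonneg : 0 ≤ x0 := Int.emod_nonneg _ (by omega)
      have hx0lt : x0 < M := Int.emod_lt_of_pos _ hMpos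
      -- x0 solves the congruence
      have hx0sol : M ∣ (Su + x0 * Du) := by
        apply Int.dvd_of_emod_eq_zero
        have e1 : (x0 * Du) % M = ((M - Su) % M * w0 * Du) % M := by
          rw [hx0, Int.mul_emod, Int.emod_emod_of_dvd _ dvd_rfl, ← Int.mul_emod]
        have e2 : ((M - Su) % M * w0 * Du) % M = ((M - Su) % M * (Du * w0)) % M := by
          ring_nf
        have e3 : ((M - Su) % M * (Du * w0)) % M = ((M - Su) % M * 1) % M := by
          rw [Int.mul_emod, Int.emod_emod_of_dvd _ dvd_rfl, hw0]
        have e4 : ((M - Su) % M * 1) % M = (M - Su) % M := by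
          rw [mul_one, Int.emod_emod_of_dvd _ dvd_rfl]
        have e5 : (M - Su) % M = (-Su) % M := by
          have : M - Su = -Su + M * 1 := by ring
          rw [this, Int.add_mul_emod_self_left]
        have e6 : (Su + x0 * Du) % M = ((Su % M) + ((x0 * Du) % M)) % M := by
          rw [Int.add_emod]
        rw [e6, e1, e2, e3, e4, e5, ← Int.add_emod]
        simp
      have hpredx0 : (fun x => PySem.Int.mod (s + x * d) 256 == 0) x0 = true := by
        simp only [hmod256, beq_iff_eq]
        exact Int.emod_eq_zero_of_dvd ((hdvdP x0).mpr hx0sol)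
      symm
      apply pv_find?_pyRange_eq_some _ _ _ _ hx0nonneg (by omega) hpredx0
      intro y hy0 hylt
      simp only [hmod256, beq_eq_false_iff_ne, ne_eq]
      intro hy
      have h1 : M ∣ (Su + y * Du) := (hdvdP y).mp (Int.dvd_of_emod_eq_zero hy)
      have h2 : M ∣ ((x0 - y) * Du) := by
        have : (x0 - y) * Du = (Su + x0 * Du) - (Su + y * Du) := by ring
        rw [this]
        exact dvd_sub hx0sol h1
      have h3 : M ∣ (x0 - y) := hcop.dvd_of_dvd_mul_right h2
      have h4 : M ≤ x0 - y := Int.le_of_dvd (by omega) h3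
      omega

-- ===== VERDICT (by name: the statement is the Claim_ definition above) =====
theorem calculate_number_of_steps_spec : Claim_unchanged_calculate_number_of_steps := by
  intro start delta _ hD
  show calculate_number_of_steps start delta = calculate_number_of_steps_alt start delta
  have hD' : ¬(PySem.Int.mod start 256 = 0 ∧ PySem.Int.mod delta 256 = 0) := by
    rw [PySem.Int.mod_eq_emod_of_pos (by omega : (0:Int) < 256),
      PySem.Int.mod_eq_emod_of_pos (by omega : (0:Int) < 256)]
    exact hD
  unfold calculate_number_of_steps calculate_number_of_steps_alt
  by_cases h255 : delta = 255
  · simp [h255]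
  by_cases h1 : delta = 1
  · simp [h1]
  rw [if_neg h255, if_neg h1, if_neg h255, if_neg h1, pv_mod_shift, pv_mod_shift]
  have hs := pv_mod_range start
  have hd := pv_mod_range delta
  exact pv_key _ _ hs.1 hs.2 hd.1 hd.2 (fun h => hD' h)

theorem calculate_number_of_steps_changed : Claim_changed_calculate_number_of_steps := by
  unfold Claim_changed_calculate_number_of_steps; decide

theorem calculate_number_of_steps_tight : Claim_exact_calculate_number_of_steps := by
  intro start delta _ hDD
  have hD : PySem.Int.mod start 256 = 0 ∧ PySem.Int.mod delta 256 = 0 := by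
    rw [PySem.Int.mod_eq_emod_of_pos (by omega : (0:Int) < 256),
      PySem.Int.mod_eq_emod_of_pos (by omega : (0:Int) < 256)]
    exact hDD
  have h255 : delta ≠ 255 := by
    intro h
    have h2 := hD.2
    rw [h] at h2
    revert h2
    decide
  have h1 : delta ≠ 1 := by
    intro h
    have h2 := hD.2
    rw [h] at h2
    revert h2
    decide
  unfold calculate_number_of_steps calculate_number_of_steps_alt
  rw [if_neg h255, if_neg h1, if_neg h255, if_neg h1, pv_mod_shift, pv_mod_shift, hD.1, hD.2]
  decide
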